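-- pv_equiv track=rewrite | github.com/Prathyarthi/Python_training | filter_text.py | solve
-- ===== SOURCE A (Python) =====
-- def solve(n,p):
--     contest_duration = 4*60
--
--     travel_time = p
--     remaining_time = contest_duration - travel_time
--
--     time_per_problem = [5 * i for i in range(1,n+1)]
--
--     count = 0
--
--     for time in time_per_problem:
--         if remaining_time >= time:
--             remaining_time-=time
--             count+=1
--         else:
--             break
--
--     return count
-- ===== SOURCE B (Python) =====
-- def _isqrt(x):
--     # integer square root, recursive digit-doubling; x >= 0
--     if x < 2:
--         return x
--     a = _isqrt(x // 4)
--     b = 2 * a + 1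
--     return b if b * b <= x else 2 * a
--
-- def solve(n, p):
--     r = 240 - p
--     if n <= 0 or r <= 0:
--         return 0
--     m = (2 * r) // 5
--     k = (_isqrt(4 * m + 1) - 1) // 2
--     return n if n < k else k
-- ===== Notes on version B (the rewrite author's own statement) =====
-- stated objective: faster
-- what changed: Replaces the greedy loop over [5,10,...,5n] by solving the triangular inequality 5k(k+1)/2 <= 240-p in closed form with a recursive integer square root, then capping at n.
import Mathlib
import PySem

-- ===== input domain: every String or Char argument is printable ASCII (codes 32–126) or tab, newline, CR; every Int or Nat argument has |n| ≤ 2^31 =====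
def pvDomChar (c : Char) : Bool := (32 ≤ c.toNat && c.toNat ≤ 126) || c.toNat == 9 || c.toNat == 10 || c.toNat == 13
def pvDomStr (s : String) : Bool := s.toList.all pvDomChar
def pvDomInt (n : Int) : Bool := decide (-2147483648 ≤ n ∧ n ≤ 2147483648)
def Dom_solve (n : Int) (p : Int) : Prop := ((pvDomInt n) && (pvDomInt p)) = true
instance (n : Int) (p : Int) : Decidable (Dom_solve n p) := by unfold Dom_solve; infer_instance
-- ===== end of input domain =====

-- B replaces A's O(n) greedy loop by the closed-form solution of 5k(k+1)/2 ≤ 240-p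
-- (via a recursive integer square root) capped at n; objective: faster (asymptotic).

-- ===== PORT A =====
-- the for-loop with break, over the remaining times; state (remaining_time, count)
def solveLoop : List Int → Int → Int → Int
  | [], _, count => count
  | t :: ts, rem, count =>
    if rem ≥ t then solveLoop ts (rem - t) (count + 1) else count

def solve (n : Int) (p : Int) : Int :=
  let contest_duration : Int := 4 * 60
  let travel_time := p
  let remaining_time := contest_duration - travel_time
  let time_per_problem := (PySem.List.pyRange 1 (n + 1) 1).map (fun i => 5 * i)
  solveLoop time_per_problem remaining_time 0

-- ===== PORT B =====
-- recursive integer square root (_isqrt in Source B); x // 4 is Nat division on x ≥ 0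
def isq (x : Nat) : Nat :=
  if _h : x < 2 then x
  else
    let a := isq (x / 4)
    let b := 2 * a + 1
    if b * b ≤ x then b else 2 * a
termination_by x
decreasing_by exact Nat.div_lt_self (by omega) (by norm_num)

def solve_alt (n : Int) (p : Int) : Int :=
  let r : Int := 240 - p
  if n ≤ 0 ∨ r ≤ 0 then 0
  else
    let m := PySem.Int.floordiv (2 * r) 5
    let k := PySem.Int.floordiv ((isq (4 * m + 1).toNat : Int) - 1) 2
    if n < k then n else k

-- ===== PRECONDITION & SPEC =====
def Spec_solve (n : Int) (p : Int) (out : Int) : Prop := out = solve_alt n p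
instance (n : Int) (p : Int) (out : Int) : Decidable (Spec_solve n p out) := by unfold Spec_solve; infer_instance

-- ===== CLAIM (what is proved, stated in full; the proofs are below) =====
def Claim_equal_solve : Prop := ∀ (n : Int) (p : Int), Dom_solve n p → Spec_solve n p (solve n p)

-- ===== LEMMAS AND PROOFS =====

-- characterisation of the answer: c problems fit, c ≤ n, and (unless c = n) c+1 do not fit
def Ans (n r c : Int) : Prop :=
  0 ≤ c ∧ c ≤ n ∧ 5 * c * (c + 1) ≤ 2 * r ∧ (c < n → 2 * r < 5 * (c + 1) * (c + 2))

theorem Ans_unique {n r c₁ c₂ : Int} (h₁ : Ans n r c₁) (h₂ : Ans n r c₂) : c₁ = c₂ := by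
  obtain ⟨a1, b1, t1, u1⟩ := h₁
  obtain ⟨a2, b2, t2, u2⟩ := h₂
  rcases lt_trichotomy c₁ c₂ with h | h | h
  · have := u1 (lt_of_lt_of_le h b2)
    nlinarith
  · exact h
  · have := u2 (lt_of_lt_of_le h b1)
    nlinarith

theorem isq_spec (x : Nat) : isq x * isq x ≤ x ∧ x < (isq x + 1) * (isq x + 1) := by
  rw [isq]
  split
  · rename_i h
    interval_cases x <;> simp
  · rename_i h
    have ih := isq_spec (x / 4)
    have h4 : 4 * (x / 4) ≤ x := by omega
    have h4' : x < 4 * (x / 4) + 4 := by omega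
    set a := isq (x / 4) with ha
    obtain ⟨l, u⟩ := ih
    simp only
    split
    · rename_i hle
      constructor
      · exact hle
      · nlinarith
    · rename_i hgt
      push_neg at hgt
      constructor
      · nlinarith
      · nlinarith
termination_by x
decreasing_by exact Nat.div_lt_self (by omega) (by norm_num)

-- B's closed-form value satisfies the characterisation
theorem solve_alt_Ans (n p : Int) (hn : 1 ≤ n) (hr : 1 ≤ 240 - p) :
    Ans n (240 - p) (solve_alt n p) := by
  have hng : ¬ (n ≤ 0 ∨ 240 - p ≤ 0) := by push_neg; omega
  set r : Int := 240 - p with hrdef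
  set m := PySem.Int.floordiv (2 * r) 5 with hm
  have hm1 : 5 * m ≤ 2 * r := by
    have := (PySem.Int.le_floordiv_iff_mul_le (a := 2 * r) (b := 5) (q := m) (by norm_num)).mp le_rfl
    linarith
  have hm2 : 2 * r < 5 * (m + 1) := by
    have := (PySem.Int.floordiv_lt_iff_lt_mul (a := 2 * r) (b := 5) (q := m + 1) (by norm_num)).mp (by omega)
    linarith
  have hm0 : 0 ≤ m := by
    have := (PySem.Int.le_floordiv_iff_mul_le (a := 2 * r) (b := 5) (q := 0) (by norm_num)).mpr (by omega)
    omega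
  have htn : ((4 * m + 1).toNat : Int) = 4 * m + 1 := by omega
  set s : Nat := isq (4 * m + 1).toNat with hs
  obtain ⟨sl, su⟩ := isq_spec (4 * m + 1).toNat
  have sl' : (s : Int) * s ≤ 4 * m + 1 := by
    rw [← htn]; exact_mod_cast sl
  have su' : 4 * m + 1 < ((s : Int) + 1) * (s + 1) := by
    rw [← htn]; exact_mod_cast su
  have hs1 : 1 ≤ (s : Int) := by nlinarith
  set k := PySem.Int.floordiv ((s : Int) - 1) 2 with hk
  have hk1 : 2 * k ≤ (s : Int) - 1 := by
    have := (PySem.Int.le_floordiv_iff_mul_le (a := (s : Int) - 1) (b := 2) (q := k) (by norm_num)).mp le_rfl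
    linarith
  have hk2 : (s : Int) - 1 < 2 * (k + 1) := by
    have := (PySem.Int.floordiv_lt_iff_lt_mul (a := (s : Int) - 1) (b := 2) (q := k + 1) (by norm_num)).mp (by omega)
    linarith
  have hk0 : 0 ≤ k := by
    have := (PySem.Int.le_floordiv_iff_mul_le (a := (s : Int) - 1) (b := 2) (q := 0) (by norm_num)).mpr (by omega)
    omega
  -- k(k+1) ≤ m and m+1 ≤ (k+1)(k+2)
  have key1 : 5 * k * (k + 1) ≤ 2 * r := by nlinarith
  have hmk : m ≤ k * k + 3 * k + 1 := by
    have h2 : 4 * m ≤ 4 * (k * k) + 12 * k + 7 := by nlinarith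
    generalize k * k = K at h2 ⊢
    omega
  have key2 : 2 * r < 5 * (k + 1) * (k + 2) := by nlinarith
  have : solve_alt n p = if n < k then n else k := by
    simp only [solve_alt]
    rw [← hrdef, ← hm, ← hs, ← hk, if_neg hng]
  rw [this]
  split
  · rename_i hlt
    exact ⟨by omega, le_rfl, by nlinarith, by omega⟩
  · rename_i hge
    exact ⟨hk0, by omega, key1, fun _ => key2⟩

-- A's loop satisfies the characterisation (invariant: at count j, rem = r - 5·T(j) ≥ 0)
theorem solveLoop_Ans (n r : Int) (j rem : Int) (hj0 : 0 ≤ j) (hjn : j ≤ n)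
    (hrem : 0 ≤ rem) (hsum : 2 * rem = 2 * r - 5 * j * (j + 1)) :
    Ans n r (solveLoop ((PySem.List.pyRange (j + 1) (n + 1) 1).map (fun i => 5 * i)) rem j) := by
  rcases eq_or_lt_of_le hjn with heq | hlt
  · subst heq
    rw [PySem.List.pyRange_one_eq_nil (by omega)]
    simp only [List.map_nil, solveLoop]
    exact ⟨hj0, le_rfl, by nlinarith, fun h => (lt_irrefl j h).elim⟩
  · rw [PySem.List.pyRange_one_cons (by omega), List.map_cons]
    simp only [solveLoop]
    split
    · rename_i hge
      have := solveLoop_Ans n r (j + 1) (rem - 5 * (j + 1)) (by omega) (by omega)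
        (by omega) (by nlinarith)
      simpa using this
    · rename_i hlt2
      push_neg at hlt2
      exact ⟨hj0, hjn, by nlinarith, fun _ => by nlinarith⟩
termination_by (n - j).toNat
decreasing_by omega

-- ===== VERDICT (by name: the statement is the Claim_ definition above) =====
theorem solve_spec : Claim_equal_solve := by
  intro n p _
  unfold Spec_solve
  by_cases hn : n ≤ 0
  · have hA : solve n p = 0 := by
      simp [solve, PySem.List.pyRange_one_eq_nil (show n + 1 ≤ 1 by omega), solveLoop]
    have hB : solve_alt n p = 0 := by
      simp [solve_alt, hn]
    rw [hA, hB]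
  · push_neg at hn
    by_cases hr : 240 - p ≤ 0
    · have hA : solve n p = 0 := by
        simp only [solve]
        rw [PySem.List.pyRange_one_cons (show (1 : Int) < n + 1 by omega), List.map_cons]
        simp only [solveLoop]
        rw [if_neg (by omega)]
      have hB : solve_alt n p = 0 := by
        simp [solve_alt]; omega
      rw [hA, hB]
    · push_neg at hr
      have hA : Ans n (240 - p) (solve n p) := by
        have := solveLoop_Ans n (240 - p) 0 (240 - p) le_rfl (by omega) (by omega) (by ring)
        simpa [solve] using this
      have hB : Ans n (240 - p) (solve_alt n p) := solve_alt_Ans n p (by omega) (by omega)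
      exact Ans_unique hA hB
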